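-- pv_equiv track=rewrite | github.com/jungbyungkil/korea_worldcup | backend/app/services/ai_playground.py | _fallback_ace_name
-- ===== SOURCE A (Python) =====
-- from typing import Any
--
-- def _fallback_ace_name(candidates: list[dict[str, Any]]) -> str:
--     if not candidates:
--         return "유럽 에이스 (가상)"
--     for pos in ("FW", "MF"):
--         for c in candidates:
--             if c.get("position") == pos:
--                 return str(c["name"])
--     return str(candidates[0]["name"])
-- ===== SOURCE B (Python) =====
-- from typing import Any
--
-- def _fallback_ace_name(candidates: list[dict[str, Any]]) -> str:
--     if not candidates:
--         return "유럽 에이스 (가상)"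
--     first_fw = None
--     first_mf = None
--     for c in candidates:
--         pos = c.get("position")
--         if first_fw is None and pos == "FW":
--             first_fw = c
--         if first_mf is None and pos == "MF":
--             first_mf = c
--     chosen = first_fw if first_fw is not None else (first_mf if first_mf is not None else candidates[0])
--     return str(chosen["name"])
-- ===== Notes on version B (the rewrite author's own statement) =====
-- stated objective: alternative
-- what changed: Replaces the two sequential priority scans (one full pass per position) with a single pass that tracks the first FW and first MF candidates simultaneously, then picks by priority.
import Mathlib
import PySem

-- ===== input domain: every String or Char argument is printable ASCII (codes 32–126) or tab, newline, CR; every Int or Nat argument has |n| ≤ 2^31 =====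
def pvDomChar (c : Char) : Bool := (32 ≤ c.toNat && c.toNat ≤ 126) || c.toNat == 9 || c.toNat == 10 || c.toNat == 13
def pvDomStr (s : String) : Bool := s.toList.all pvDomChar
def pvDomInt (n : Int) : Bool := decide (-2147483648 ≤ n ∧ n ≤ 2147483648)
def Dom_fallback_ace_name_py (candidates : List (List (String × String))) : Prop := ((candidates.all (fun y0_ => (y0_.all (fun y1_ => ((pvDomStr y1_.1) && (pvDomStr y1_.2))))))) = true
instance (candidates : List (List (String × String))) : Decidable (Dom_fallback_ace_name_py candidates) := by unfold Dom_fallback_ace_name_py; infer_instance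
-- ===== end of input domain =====

-- B collapses A's two sequential position-priority scans into a single pass tracking the first FW and first MF candidates; return values are proved equal wherever A returns (Pre_ excludes only the KeyError inputs).


-- association-list lookup, first match = Python dict.get (exact: dicts arrive as insertion-ordered pairs)
def pvGetKey (d : List (String × String)) (k : String) : Option String :=
  (d.find? (fun p => p.1 == k)).map (·.2)

-- c["name"] ported via lookup; Pre_ guarantees the looked-up key exists, so the default is never read
def pvName (c : List (String × String)) : String := (pvGetKey c "name").getD ""

-- ===== PORT A =====
-- inner 'for c in candidates: if c.get("position") == pos: return str(c["name"])'
def aScan (pos : String) : List (List (String × String)) → Option String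
  | [] => none
  | c :: rest => if pvGetKey c "position" = some pos then some (pvName c) else aScan pos rest

def fallback_ace_name_py (candidates : List (List (String × String))) : String :=
  if candidates = [] then "유럽 에이스 (가상)"
  else
    match aScan "FW" candidates with
    | some n => n
    | none =>
      match aScan "MF" candidates with
      | some n => n
      | none => pvName (candidates.headD [])

-- ===== PORT B =====
-- one pass: remember the first candidate seen for each of FW and MF
def bStep (p : Option (List (String × String)) × Option (List (String × String)))
    (c : List (String × String)) :
    Option (List (String × String)) × Option (List (String × String)) :=
  let pos := pvGetKey c "position"
  ((if p.1.isNone && (pos = some "FW" : Bool) then some c else p.1),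
   (if p.2.isNone && (pos = some "MF" : Bool) then some c else p.2))

def fallback_ace_name_py_alt (candidates : List (List (String × String))) : String :=
  if candidates = [] then "유럽 에이스 (가상)"
  else
    let r := candidates.foldl bStep (none, none)
    match r.1 with
    | some c => pvName c
    | none =>
      match r.2 with
      | some c => pvName c
      | none => pvName (candidates.headD [])

-- ===== PRECONDITION & SPEC =====
-- Pre_ excludes exactly the inputs on which Python A raises KeyError: a nonempty list whose
-- selected candidate (first FW, else first MF, else the head) has no "name" key.
def Pre_fallback_ace_name_py (candidates : List (List (String × String))) : Prop :=
  candidates = [] ∨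
    (pvGetKey
      ((candidates.find? (fun c => pvGetKey c "position" == some "FW")).getD
        ((candidates.find? (fun c => pvGetKey c "position" == some "MF")).getD
          (candidates.headD []))) "name").isSome = true
instance (candidates : List (List (String × String))) : Decidable (Pre_fallback_ace_name_py candidates) := by unfold Pre_fallback_ace_name_py; infer_instance

def pvWitness_fallback_ace_name_py : (List (List (String × String))) :=
  [[("position", "GK"), ("name", "g")], [("position", "MF"), ("name", "m")]]

def Spec_fallback_ace_name_py (candidates : List (List (String × String))) (out : String) : Prop := out = fallback_ace_name_py_alt candidates
instance (candidates : List (List (String × String))) (out : String) : Decidable (Spec_fallback_ace_name_py candidates out) := by unfold Spec_fallback_ace_name_py; infer_instance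

-- ===== CLAIM (what is proved, stated in full; the proofs are below) =====
def Claim_equal_fallback_ace_name_py : Prop := ∀ (candidates : List (List (String × String))), Dom_fallback_ace_name_py candidates → Pre_fallback_ace_name_py candidates → Spec_fallback_ace_name_py candidates (fallback_ace_name_py candidates)

-- ===== LEMMAS AND PROOFS =====

-- A's inner scan is (map of) the first match
theorem aScan_eq_find (pos : String) (cs : List (List (String × String))) :
    aScan pos cs = (cs.find? (fun c => pvGetKey c "position" == some pos)).map pvName := by
  induction cs with
  | nil => rfl
  | cons c rest ih =>
    simp only [aScan, List.find?]
    by_cases h : pvGetKey c "position" = some pos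
    · simp [h]
    · have h' : (pvGetKey c "position" == some pos) = false := by simpa using h
      simp [h, h', ih]

-- B's fold components are the first FW / first MF matches
theorem foldl_bStep (cs : List (List (String × String)))
    (a b : Option (List (String × String))) :
    cs.foldl bStep (a, b) =
      (a.orElse (fun _ => cs.find? (fun c => pvGetKey c "position" == some "FW")),
       b.orElse (fun _ => cs.find? (fun c => pvGetKey c "position" == some "MF"))) := by
  induction cs generalizing a b with
  | nil => cases a <;> cases b <;> rfl
  | cons c rest ih =>
    simp only [List.foldl, bStep, List.find?]
    cases a with
    | some x =>
      cases b with
      | some y => simp [ih]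
      | none =>
        by_cases h : pvGetKey c "position" = some "MF"
        · simp [h, ih]
        · have h' : (pvGetKey c "position" == some "MF") = false := by simpa using h
          simp [h, h', ih]

    | none =>
      cases b with
      | some y =>
        by_cases h : pvGetKey c "position" = some "FW"
        · simp [h, ih]
        · have h' : (pvGetKey c "position" == some "FW") = false := by simpa using h
          simp [h, h', ih]

      | none =>
        by_cases hf : pvGetKey c "position" = some "FW"
        · have hm : (pvGetKey c "position" == some "MF") = false := by simp [hf]
          simp [hf, ih]
        · have hf' : (pvGetKey c "position" == some "FW") = false := by simpa using hf
          by_cases hm : pvGetKey c "position" = some "MF"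
          · simp [hm, ih]
          · have hm' : (pvGetKey c "position" == some "MF") = false := by simpa using hm
            simp [hf, hf', hm, hm', ih]

-- ===== VERDICT (by name: the statement is the Claim_ definition above) =====
theorem fallback_ace_name_py_spec : Claim_equal_fallback_ace_name_py := by
  intro candidates _ _
  unfold Spec_fallback_ace_name_py fallback_ace_name_py fallback_ace_name_py_alt
  by_cases h : candidates = []
  · simp [h]
  · simp only [h, foldl_bStep, aScan_eq_find, Option.orElse]
    cases candidates.find? (fun c => pvGetKey c "position" == some "FW") with
    | some c => rfl
    | none =>
      cases candidates.find? (fun c => pvGetKey c "position" == some "MF") with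
      | some c => rfl
      | none => rfl
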